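-- pv_equiv track=rewrite | github.com/emreCanbazoglu/AgenticResearchPlatform | run_paper.py | _format_params
-- ===== SOURCE A (Python) =====
-- from typing import Any
--
-- def _format_params(strategy_id: str, params: dict[str, Any]) -> str:
--     if strategy_id == "ma_crossover_v1":
--         return (
--             f"fast={int(params.get('fast_window', 0))} "
--             f"slow={int(params.get('slow_window', 0))}"
--         )
--     if strategy_id == "rsi_v1":
--         return (
--             f"period={int(params.get('period', 0))} "
--             f"ob={int(params.get('overbought', 0))} "
--             f"os={int(params.get('oversold', 0))}"
--         )
--     if strategy_id == "macd_v1":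
--         return (
--             f"fast={int(params.get('fast_period', 0))} "
--             f"slow={int(params.get('slow_period', 0))} "
--             f"sig={int(params.get('signal_period', 0))}"
--         )
--
--     pairs = [f"{key}={value}" for key, value in sorted(params.items())]
--     return " ".join(pairs)
-- ===== SOURCE B (Python) =====
-- from typing import Any
--
-- # Table-driven: one ordered spec per known strategy, one uniform join; same fallback.
-- _PARAM_SPECS = {
--     "ma_crossover_v1": [("fast", "fast_window"), ("slow", "slow_window")],
--     "rsi_v1": [("period", "period"), ("ob", "overbought"), ("os", "oversold")],
--     "macd_v1": [("fast", "fast_period"), ("slow", "slow_period"), ("sig", "signal_period")],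
-- }
--
--
-- def _format_params(strategy_id: str, params: dict[str, Any]) -> str:
--     spec = _PARAM_SPECS.get(strategy_id)
--     if spec is not None:
--         return " ".join(f"{label}={int(params.get(key, 0))}" for label, key in spec)
--     return " ".join(f"{key}={value}" for key, value in sorted(params.items()))
-- ===== Notes on version B (the rewrite author's own statement) =====
-- stated objective: idiomatic
-- what changed: Replaces the three hard-coded if-branches with a module-level table mapping each strategy id to an ordered (label, key) spec, consumed by one uniform join loop; the sorted-items fallback is shared.
import Mathlib
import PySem

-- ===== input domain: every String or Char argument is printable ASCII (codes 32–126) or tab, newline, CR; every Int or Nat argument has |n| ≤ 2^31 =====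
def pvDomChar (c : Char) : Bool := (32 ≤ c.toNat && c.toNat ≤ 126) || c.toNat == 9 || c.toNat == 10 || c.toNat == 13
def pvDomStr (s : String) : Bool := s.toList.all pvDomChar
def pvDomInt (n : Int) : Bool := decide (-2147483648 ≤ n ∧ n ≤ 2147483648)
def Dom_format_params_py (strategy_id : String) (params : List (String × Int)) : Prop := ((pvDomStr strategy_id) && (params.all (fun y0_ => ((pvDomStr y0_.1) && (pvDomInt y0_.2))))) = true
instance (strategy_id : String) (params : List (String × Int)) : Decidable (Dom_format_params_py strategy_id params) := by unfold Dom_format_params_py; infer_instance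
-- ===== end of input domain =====

-- B replaces A's three hard-coded if-branches with a lookup table of (label, key) specs and one uniform join loop (idiomatic decomposition; same cost).
-- ===== PORT A =====
-- The association list stands for a Python dict built first-binding-wins (setdefault);
-- values are ints, so Python's int() coercion is the identity and f"{value}" is str(value).
def pvToDict (params : List (String × Int)) : PySem.Dict String Int :=
  params.foldl (fun d p => d.setdefault p.1 p.2) PySem.Dict.empty

def format_params_py (strategy_id : String) (params : List (String × Int)) : String :=
  let d := pvToDict params
  if strategy_id == "ma_crossover_v1" then
    "fast=" ++ PySem.Int.toStr (d.getD "fast_window" 0) ++ " slow=" ++ PySem.Int.toStr (d.getD "slow_window" 0)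
  else if strategy_id == "rsi_v1" then
    "period=" ++ PySem.Int.toStr (d.getD "period" 0) ++ " ob=" ++ PySem.Int.toStr (d.getD "overbought" 0) ++ " os=" ++ PySem.Int.toStr (d.getD "oversold" 0)
  else if strategy_id == "macd_v1" then
    "fast=" ++ PySem.Int.toStr (d.getD "fast_period" 0) ++ " slow=" ++ PySem.Int.toStr (d.getD "slow_period" 0) ++ " sig=" ++ PySem.Int.toStr (d.getD "signal_period" 0)
  else
    -- sorted(params.items()): dict keys are distinct, so sorting by the key alone is exact
    PySem.Str.join " " ((PySem.List.sorted d.items (fun p => p.1) false).map (fun p => p.1 ++ "=" ++ PySem.Int.toStr p.2))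

-- ===== PORT B =====
def pvSpecTable : List (String × List (String × String)) :=
  [("ma_crossover_v1", [("fast", "fast_window"), ("slow", "slow_window")]),
   ("rsi_v1", [("period", "period"), ("ob", "overbought"), ("os", "oversold")]),
   ("macd_v1", [("fast", "fast_period"), ("slow", "slow_period"), ("sig", "signal_period")])]

def format_params_py_alt (strategy_id : String) (params : List (String × Int)) : String :=
  let d := pvToDict params
  match pvSpecTable.lookup strategy_id with
  | some spec =>
      PySem.Str.join " " (spec.map (fun lk => lk.1 ++ "=" ++ PySem.Int.toStr (d.getD lk.2 0)))
  | none =>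
      -- sorted(params.items()): dict keys are distinct, so sorting by the key alone is exact
      PySem.Str.join " " ((PySem.List.sorted d.items (fun p => p.1) false).map (fun p => p.1 ++ "=" ++ PySem.Int.toStr p.2))

-- ===== PRECONDITION & SPEC =====
def Spec_format_params_py (strategy_id : String) (params : List (String × Int)) (out : String) : Prop := out = format_params_py_alt strategy_id params
instance (strategy_id : String) (params : List (String × Int)) (out : String) : Decidable (Spec_format_params_py strategy_id params out) := by unfold Spec_format_params_py; infer_instance

-- ===== CLAIM (what is proved, stated in full; the proofs are below) =====
def Claim_equal_format_params_py : Prop := ∀ (strategy_id : String) (params : List (String × Int)), Dom_format_params_py strategy_id params → Spec_format_params_py strategy_id params (format_params_py strategy_id params)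

-- ===== LEMMAS AND PROOFS =====
theorem pv_join2 (a b : String) : PySem.Str.join " " [a, b] = a ++ " " ++ b := by
  refine String.toList_inj.mp ?_
  simp [PySem.Chars.join, List.intercalate]

theorem pv_join3 (a b c : String) : PySem.Str.join " " [a, b, c] = a ++ " " ++ b ++ " " ++ c := by
  refine String.toList_inj.mp ?_
  simp [PySem.Chars.join, List.intercalate]

-- ===== VERDICT (by name: the statement is the Claim_ definition above) =====
theorem format_params_py_spec : Claim_equal_format_params_py := by
  intro s params _
  show format_params_py s params = format_params_py_alt s params
  unfold format_params_py format_params_py_alt pvSpecTable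
  by_cases h1 : s = "ma_crossover_v1"
  · subst h1
    simp [List.lookup, pv_join2, String.append_assoc]
    refine String.toList_inj.mp ?_
    simp
  · by_cases h2 : s = "rsi_v1"
    · subst h2
      simp [List.lookup, pv_join3]
      refine String.toList_inj.mp ?_
      simp
    · by_cases h3 : s = "macd_v1"
      · subst h3
        simp [List.lookup, pv_join3]
        refine String.toList_inj.mp ?_
        simp
      · have e1 : (s == "ma_crossover_v1") = false := beq_eq_false_iff_ne.mpr h1
        have e2 : (s == "rsi_v1") = false := beq_eq_false_iff_ne.mpr h2
        have e3 : (s == "macd_v1") = false := beq_eq_false_iff_ne.mpr h3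
        simp [List.lookup, e1, e2, e3]
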